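-- pv_equiv track=rewrite | github.com/filipecn/maldives | utils.py | perceptuallyImportantPoints
-- ===== SOURCE A (Python) =====
-- def perceptuallyImportantPoints(prices, n=5):
--     pips = [0, len(prices) - 1]
--     def distance(x0, y0, x1, y1):
--         return (x0 - x1)**2 + (y0 - y1)**2
--     def pip(l, h):
--         m = 0
--         mi = 0
--         for i in range(l + 1, h):
--             dist = distance(i, prices[i], l, prices[l]) + distance(i, prices[i], h, prices[h])
--             if dist > m:
--                 m = dist
--                 mi = i
--         return mi, m
--     while len(pips) < n:
--         m = 0
--         mi = 0
--         for i in range(len(pips) - 1):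
--             if pips[i + 1] - 1 > pips[i]:
--                 mmi, mm = pip(pips[i], pips[i + 1])
--                 if mm > m:
--                     m = mm
--                     mi = mmi
--         pips.append(mi)
--         pips.sort()
--     return pips
-- ===== SOURCE B (Python) =====
-- def perceptuallyImportantPoints(prices, n=5):
--     # Cache the best split point of every segment; after a split only the two
--     # new sub-segments are recomputed, and the result is sorted once at the end.
--     N = len(prices)
--     if n <= 2:
--         return [0, N - 1]
--
--     def best(l, h):
--         mi = 0
--         m = 0
--         for i in range(l + 1, h):
--             d = (i - l) ** 2 + (prices[i] - prices[l]) ** 2 \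
--                 + (i - h) ** 2 + (prices[i] - prices[h]) ** 2
--             if d > m:
--                 mi = i
--                 m = d
--         return mi, m
--
--     res = [0, N - 1]
--     segs = []                       # only segments with interior points, left to right
--     if N - 1 > 1:
--         segs.append((0, N - 1) + best(0, N - 1))
--
--     while len(res) < n:
--         m = 0
--         mi = 0
--         for (l, h, bi, bd) in segs:
--             if bd > m:
--                 m = bd
--                 mi = bi
--         res.append(mi)
--         if m > 0:
--             new = []
--             for (l, h, bi, bd) in segs:
--                 if l < mi < h:
--                     if mi - l > 1:
--                         new.append((l, mi) + best(l, mi))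
--                     if h - mi > 1:
--                         new.append((mi, h) + best(mi, h))
--                 else:
--                     new.append((l, h, bi, bd))
--             segs = new
--     res.sort()
--     return res
-- ===== Notes on version B (the rewrite author's own statement) =====
-- stated objective: faster
-- what changed: B caches each segment's best split point and, after each split, recomputes only the two new sub-segments (keeping only segments with interior points) and sorts the result once at the end, instead of A's rescan of every segment's every interior point and re-sort of the pip list on every iteration.
import Mathlib
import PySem

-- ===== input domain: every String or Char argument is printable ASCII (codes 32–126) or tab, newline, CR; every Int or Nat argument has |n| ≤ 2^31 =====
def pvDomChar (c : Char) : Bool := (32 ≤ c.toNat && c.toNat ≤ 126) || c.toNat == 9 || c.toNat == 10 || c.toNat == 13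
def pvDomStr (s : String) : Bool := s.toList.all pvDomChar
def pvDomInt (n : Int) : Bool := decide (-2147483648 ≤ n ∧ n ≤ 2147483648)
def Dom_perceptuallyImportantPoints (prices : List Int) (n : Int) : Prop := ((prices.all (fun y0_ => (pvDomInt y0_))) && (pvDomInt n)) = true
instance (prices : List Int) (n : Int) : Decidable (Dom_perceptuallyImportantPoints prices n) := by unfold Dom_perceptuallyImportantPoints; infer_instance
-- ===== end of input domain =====

-- B caches each segment's best split point and recomputes only the two new
-- sub-segments after each split, sorting the result once at the end (faster,
-- as measured); A rescans every interior point of every segment each round.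

-- ===== PORT A =====
def pvDistA (x0 y0 x1 y1 : Int) : Int := (x0 - x1) ^ 2 + (y0 - y1) ^ 2

-- A's inner 'pip(l, h)': scan range(l+1, h), keep (mi, m) with strict '>'
def pvPipA (prices : List Int) (l h : Int) : Int × Int :=
  (PySem.List.pyRange (l + 1) h 1).foldl
    (fun acc i =>
      let dist := pvDistA i (PySem.List.pyGetD prices i 0) l (PySem.List.pyGetD prices l 0)
        + pvDistA i (PySem.List.pyGetD prices i 0) h (PySem.List.pyGetD prices h 0)
      if dist > acc.2 then (i, dist) else acc)
    (0, 0)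

-- A's per-round scan 'for i in range(len(pips)-1)' over consecutive pips pairs,
-- accumulating (m, mi)
def pvStepA (prices : List Int) (pips : List Int) : Int × Int :=
  (pips.zip pips.tail).foldl
    (fun acc p =>
      if p.2 - 1 > p.1 then
        let r := pvPipA prices p.1 p.2
        if r.2 > acc.1 then (r.2, r.1) else acc
      else acc)
    (0, 0)

-- A's 'while len(pips) < n' loop; fuel (n-2).toNat = exact number of iterations
def pvLoopA (prices : List Int) (n : Int) : Nat → List Int → List Int
  | 0, pips => pips
  | f + 1, pips =>
    if pips.length < n then
      pvLoopA prices n f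
        (PySem.List.sorted (pips ++ [(pvStepA prices pips).2]) (fun x => x) false)
    else pips

def perceptuallyImportantPoints (prices : List Int) (n : Int) : List Int :=
  pvLoopA prices n (n - 2).toNat [0, (prices.length : Int) - 1]

-- ===== PORT B =====
-- B's 'best(l, h)'
def pvBestB (prices : List Int) (l h : Int) : Int × Int :=
  (PySem.List.pyRange (l + 1) h 1).foldl
    (fun acc i =>
      let d := (i - l) ^ 2 + (PySem.List.pyGetD prices i 0 - PySem.List.pyGetD prices l 0) ^ 2
        + (i - h) ^ 2 + (PySem.List.pyGetD prices i 0 - PySem.List.pyGetD prices h 0) ^ 2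
      if d > acc.2 then (i, d) else acc)
    (0, 0)

-- B's scan of the cached (l, h, bi, bd) segments, accumulating (m, mi)
def pvScanB (segs : List (Int × Int × Int × Int)) : Int × Int :=
  segs.foldl (fun acc s => if s.2.2.2 > acc.1 then (s.2.2.2, s.2.2.1) else acc) (0, 0)

-- B's rebuild of the segment list: split the segment containing mi, keep the rest
def pvSplitB (prices : List Int) (mi : Int) (segs : List (Int × Int × Int × Int)) :
    List (Int × Int × Int × Int) :=
  segs.flatMap (fun s =>
    if s.1 < mi ∧ mi < s.2.1 then
      (if mi - s.1 > 1 then [(s.1, mi, pvBestB prices s.1 mi)] else [])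
        ++ (if s.2.1 - mi > 1 then [(mi, s.2.1, pvBestB prices mi s.2.1)] else [])
    else [s])

-- B's 'while len(res) < n' loop
def pvLoopB (prices : List Int) (n : Int) :
    Nat → List Int → List (Int × Int × Int × Int) → List Int
  | 0, res, _ => res
  | f + 1, res, segs =>
    if res.length < n then
      let r := pvScanB segs
      pvLoopB prices n f (res ++ [r.2])
        (if r.1 > 0 then pvSplitB prices r.2 segs else segs)
    else res

def perceptuallyImportantPoints_alt (prices : List Int) (n : Int) : List Int :=
  if n ≤ 2 then [0, (prices.length : Int) - 1]
  else
    PySem.List.sorted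
      (pvLoopB prices n (n - 2).toNat [0, (prices.length : Int) - 1]
        (if (prices.length : Int) - 1 > 1 then
          [(0, (prices.length : Int) - 1, pvBestB prices 0 ((prices.length : Int) - 1))]
        else []))
      (fun x => x) false

-- ===== PRECONDITION & SPEC =====
def Spec_perceptuallyImportantPoints (prices : List Int) (n : Int) (out : List Int) : Prop := out = perceptuallyImportantPoints_alt prices n
instance (prices : List Int) (n : Int) (out : List Int) : Decidable (Spec_perceptuallyImportantPoints prices n out) := by unfold Spec_perceptuallyImportantPoints; infer_instance

-- ===== CLAIM (what is proved, stated in full; the proofs are below) =====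
def Claim_equal_perceptuallyImportantPoints : Prop := ∀ (prices : List Int) (n : Int), Dom_perceptuallyImportantPoints prices n → Spec_perceptuallyImportantPoints prices n (perceptuallyImportantPoints prices n)

-- ===== LEMMAS AND PROOFS =====
-- consecutive pairs of a list
def pvPairs (xs : List Int) : List (Int × Int) := xs.zip xs.tail

-- endpoints of a cached segment
def pvPrj (s : Int × Int × Int × Int) : Int × Int := (s.1, s.2.1)

-- the loop invariant tying A's state (pips) to B's state (res, segs)
def pvInv (prices : List Int) (pips res : List Int)
    (segs : List (Int × Int × Int × Int)) : Prop :=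
  pips = PySem.List.sorted res (fun x => x) false ∧
  segs.map pvPrj = (pvPairs pips).filter (fun p => decide (p.1 + 1 < p.2)) ∧
  (∀ s ∈ segs, s.2.2 = pvBestB prices s.1 s.2.1) ∧
  (0 : Int) ∈ pips

theorem pvPipA_eq_pvBestB (prices : List Int) (l h : Int) :
    pvPipA prices l h = pvBestB prices l h := by
  unfold pvPipA pvBestB pvDistA
  apply List.foldl_ext
  intro acc i _
  dsimp only
  have hd : (i - l) ^ 2 + (PySem.List.pyGetD prices i 0 - PySem.List.pyGetD prices l 0) ^ 2
      + ((i - h) ^ 2 + (PySem.List.pyGetD prices i 0 - PySem.List.pyGetD prices h 0) ^ 2)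
      = (i - l) ^ 2 + (PySem.List.pyGetD prices i 0 - PySem.List.pyGetD prices l 0) ^ 2
      + (i - h) ^ 2 + (PySem.List.pyGetD prices i 0 - PySem.List.pyGetD prices h 0) ^ 2 := by
    ring
  rw [hd]

theorem pvFoldBest_mem (d : Int → Int) (xs : List Int) :
    ∀ acc : Int × Int,
      xs.foldl (fun acc i => if d i > acc.2 then (i, d i) else acc) acc = acc ∨
        (xs.foldl (fun acc i => if d i > acc.2 then (i, d i) else acc) acc).1 ∈ xs := by
  induction xs with
  | nil => intro acc; left; rfl
  | cons x xs ih =>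
    intro acc
    simp only [List.foldl_cons]
    by_cases hx : d x > acc.2
    · rw [if_pos hx]
      rcases ih (x, d x) with h | h
      · right; rw [h]; exact List.mem_cons_self
      · right; exact List.mem_cons_of_mem _ h
    · rw [if_neg hx]
      rcases ih acc with h | h
      · left; exact h
      · right; exact List.mem_cons_of_mem _ h

theorem pvBestB_pos_bounds (prices : List Int) (l h : Int)
    (hpos : 0 < (pvBestB prices l h).2) :
    l + 1 ≤ (pvBestB prices l h).1 ∧ (pvBestB prices l h).1 < h := by
  have hm := pvFoldBest_mem
    (fun i => (i - l) ^ 2 + (PySem.List.pyGetD prices i 0 - PySem.List.pyGetD prices l 0) ^ 2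
      + (i - h) ^ 2 + (PySem.List.pyGetD prices i 0 - PySem.List.pyGetD prices h 0) ^ 2)
    (PySem.List.pyRange (l + 1) h 1) (0, 0)
  have hb : pvBestB prices l h
      = (PySem.List.pyRange (l + 1) h 1).foldl
          (fun acc i =>
            if (fun i => (i - l) ^ 2 + (PySem.List.pyGetD prices i 0 - PySem.List.pyGetD prices l 0) ^ 2
              + (i - h) ^ 2 + (PySem.List.pyGetD prices i 0 - PySem.List.pyGetD prices h 0) ^ 2) i > acc.2
            then (i, (fun i => (i - l) ^ 2 + (PySem.List.pyGetD prices i 0 - PySem.List.pyGetD prices l 0) ^ 2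
              + (i - h) ^ 2 + (PySem.List.pyGetD prices i 0 - PySem.List.pyGetD prices h 0) ^ 2) i)
            else acc) (0, 0) := rfl
  rw [← hb] at hm
  rcases hm with hm | hm
  · rw [hm] at hpos; exact absurd hpos (by norm_num)
  · rw [PySem.List.mem_pyRange_one] at hm; exact hm

theorem pvScanB_cases (segs : List (Int × Int × Int × Int)) (acc : Int × Int)
    (hacc : 0 ≤ acc.1) :
    segs.foldl (fun acc s => if s.2.2.2 > acc.1 then (s.2.2.2, s.2.2.1) else acc) acc = acc ∨
      ∃ s ∈ segs,
        segs.foldl (fun acc s => if s.2.2.2 > acc.1 then (s.2.2.2, s.2.2.1) else acc) acc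
            = (s.2.2.2, s.2.2.1) ∧ 0 < s.2.2.2 := by
  induction segs generalizing acc with
  | nil => left; rfl
  | cons s segs ih =>
    simp only [List.foldl_cons]
    by_cases hs : s.2.2.2 > acc.1
    · rw [if_pos hs]
      rcases ih (s.2.2.2, s.2.2.1) (by simp; omega) with h | ⟨t, ht, h, hp⟩
      · right; exact ⟨s, List.mem_cons_self, h, by omega⟩
      · right; exact ⟨t, List.mem_cons_of_mem _ ht, h, hp⟩
    · rw [if_neg hs]
      rcases ih acc hacc with h | ⟨t, ht, h, hp⟩
      · left; exact h
      · right; exact ⟨t, List.mem_cons_of_mem _ ht, h, hp⟩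

theorem pvStep_eq (prices : List Int) (ps : List (Int × Int)) :
    ∀ (segs : List (Int × Int × Int × Int)) (acc : Int × Int), 0 ≤ acc.1 →
    segs.map pvPrj = ps.filter (fun p => decide (p.1 + 1 < p.2)) →
    (∀ s ∈ segs, s.2.2 = pvBestB prices s.1 s.2.1) →
    ps.foldl
        (fun acc p =>
          if p.2 - 1 > p.1 then
            let r := pvPipA prices p.1 p.2
            if r.2 > acc.1 then (r.2, r.1) else acc
          else acc) acc
      = segs.foldl (fun acc s => if s.2.2.2 > acc.1 then (s.2.2.2, s.2.2.1) else acc) acc := by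
  induction ps with
  | nil =>
    intro segs acc _ hmap _
    simp only [List.filter_nil, List.map_eq_nil_iff] at hmap
    rw [hmap]; rfl
  | cons p ps ih =>
    intro segs acc hacc hmap hcache
    by_cases hc : p.1 + 1 < p.2
    · rw [List.filter_cons_of_pos (by simpa using hc)] at hmap
      cases segs with
      | nil => simp at hmap
      | cons s segs' =>
        simp only [List.map_cons, List.cons.injEq] at hmap
        obtain ⟨hprj, hmap'⟩ := hmap
        have hl : s.1 = p.1 := congrArg Prod.fst hprj
        have hh : s.2.1 = p.2 := congrArg Prod.snd hprj
        have hbd : s.2.2 = pvBestB prices s.1 s.2.1 := hcache s List.mem_cons_self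
        simp only [List.foldl_cons]
        have hstep : (if p.2 - 1 > p.1 then
              let r := pvPipA prices p.1 p.2
              if r.2 > acc.1 then (r.2, r.1) else acc
            else acc)
            = (if s.2.2.2 > acc.1 then (s.2.2.2, s.2.2.1) else acc) := by
          rw [if_pos (by omega : p.2 - 1 > p.1)]
          show (if (pvPipA prices p.1 p.2).2 > acc.1
              then ((pvPipA prices p.1 p.2).2, (pvPipA prices p.1 p.2).1) else acc) = _
          rw [pvPipA_eq_pvBestB, ← hl, ← hh, ← hbd]
        rw [hstep]
        refine ih segs' _ ?_ hmap' (fun t ht => hcache t (List.mem_cons_of_mem _ ht))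
        by_cases hgt : s.2.2.2 > acc.1
        · rw [if_pos hgt]; simp only []; omega
        · rw [if_neg hgt]; exact hacc
    · rw [List.filter_cons_of_neg (by simpa using hc)] at hmap
      simp only [List.foldl_cons]
      rw [if_neg (by omega : ¬ p.2 - 1 > p.1)]
      exact ih segs acc hacc hmap hcache

theorem pvPairs_cons_cons (x y : Int) (t : List Int) :
    pvPairs (x :: y :: t) = (x, y) :: pvPairs (y :: t) := rfl

theorem pvPairs_append_cons (u : List Int) (a : Int) (v : List Int) :
    pvPairs (u ++ a :: v) = pvPairs (u ++ [a]) ++ pvPairs (a :: v) := by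
  induction u with
  | nil => simp [pvPairs]
  | cons x u ih =>
    cases u with
    | nil =>
      cases v with
      | nil => simp [pvPairs]
      | cons b v => rfl
    | cons y u' =>
      have ih' := ih
      simp only [List.cons_append] at ih' ⊢
      rw [pvPairs_cons_cons, pvPairs_cons_cons]
      simp only [List.cons_append]
      exact congrArg _ ih'

theorem pvMem_pairs_split (xs : List Int) (p : Int × Int) (hp : p ∈ pvPairs xs) :
    ∃ u v, xs = u ++ p.1 :: p.2 :: v := by
  induction xs with
  | nil => simp [pvPairs] at hp
  | cons x xs ih =>
    cases xs with
    | nil => simp [pvPairs] at hp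
    | cons y t =>
      rw [pvPairs_cons_cons] at hp
      rcases List.mem_cons.mp hp with h | h
      · exact ⟨[], t, by subst h; rfl⟩
      · obtain ⟨u, v, huv⟩ := ih h
        exact ⟨x :: u, v, by rw [List.cons_append, ← huv]⟩

theorem pvPairs_mem_comp (xs : List Int) (p : Int × Int) (hp : p ∈ pvPairs xs) :
    p.1 ∈ xs ∧ p.2 ∈ xs := by
  obtain ⟨u, v, huv⟩ := pvMem_pairs_split xs p hp
  subst huv
  constructor
  · exact List.mem_append_right u List.mem_cons_self
  · exact List.mem_append_right u (List.mem_cons_of_mem _ List.mem_cons_self)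












theorem pvPairwise_dup (u v : List Int) (a : Int)
    (h : (u ++ a :: v).Pairwise (· ≤ ·)) : (u ++ a :: a :: v).Pairwise (· ≤ ·) := by
  rw [List.pairwise_append] at h ⊢
  obtain ⟨h1, h2, h3⟩ := h
  rw [List.pairwise_cons] at h2
  obtain ⟨h4, h5⟩ := h2
  refine ⟨h1, ?_, ?_⟩
  · rw [List.pairwise_cons]
    refine ⟨?_, ?_⟩
    · intro b hb
      rcases List.mem_cons.mp hb with rfl | hb
      · exact le_refl _
      · exact h4 b hb
    · rw [List.pairwise_cons]; exact ⟨h4, h5⟩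
  · intro x hx y hy
    rcases List.mem_cons.mp hy with rfl | hy
    · exact h3 x hx y List.mem_cons_self
    · exact h3 x hx y hy

theorem pvPairwise_insert (u v : List Int) (a b c : Int)
    (h : (u ++ a :: c :: v).Pairwise (· ≤ ·)) (hab : a ≤ b) (hbc : b ≤ c) :
    (u ++ a :: b :: c :: v).Pairwise (· ≤ ·) := by
  rw [List.pairwise_append] at h ⊢
  obtain ⟨h1, h2, h3⟩ := h
  rw [List.pairwise_cons] at h2
  obtain ⟨h4, h5⟩ := h2
  rw [List.pairwise_cons] at h5
  obtain ⟨h6, h7⟩ := h5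
  refine ⟨h1, ?_, ?_⟩
  · rw [List.pairwise_cons]
    refine ⟨?_, ?_⟩
    · intro y hy
      rcases List.mem_cons.mp hy with rfl | hy
      · exact hab
      · exact h4 y hy
    · rw [List.pairwise_cons]
      refine ⟨?_, ?_⟩
      · intro y hy
        rcases List.mem_cons.mp hy with rfl | hy
        · exact hbc
        · exact hbc.trans (h6 y hy)
      · rw [List.pairwise_cons]; exact ⟨h6, h7⟩
  · intro x hx y hy
    rcases List.mem_cons.mp hy with rfl | hy
    · exact h3 x hx y List.mem_cons_self
    · rcases List.mem_cons.mp hy with rfl | hy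
      · exact (h3 x hx a List.mem_cons_self).trans hab
      · exact h3 x hx y (List.mem_cons_of_mem _ hy)

theorem pvBounds (u v : List Int) (a c : Int)
    (h : (u ++ a :: c :: v).Pairwise (· ≤ ·)) :
    (∀ x ∈ u, x ≤ a) ∧ (∀ y ∈ v, c ≤ y) := by
  rw [List.pairwise_append] at h
  obtain ⟨h1, h2, h3⟩ := h
  rw [List.pairwise_cons] at h2
  obtain ⟨h4, h5⟩ := h2
  rw [List.pairwise_cons] at h5
  obtain ⟨h6, h7⟩ := h5
  exact ⟨fun x hx => h3 x hx a List.mem_cons_self, h6⟩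

theorem pvPerm_ins (xs ys : List Int) (a : Int) :
    (xs ++ a :: ys).Perm ((xs ++ ys) ++ [a]) :=
  List.perm_middle.trans (List.perm_append_singleton a (xs ++ ys)).symm

theorem pvFlatMap_id {α : Type} (g : α → List α) (l : List α)
    (h : ∀ x ∈ l, g x = [x]) : l.flatMap g = l := by
  induction l with
  | nil => rfl
  | cons x l ih =>
    rw [List.flatMap_cons, h x List.mem_cons_self,
      ih (fun y hy => h y (List.mem_cons_of_mem _ hy))]
    rfl

theorem pvSplitB_cache (prices : List Int) (mi : Int)
    (segs : List (Int × Int × Int × Int))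
    (h : ∀ s ∈ segs, s.2.2 = pvBestB prices s.1 s.2.1) :
    ∀ t ∈ pvSplitB prices mi segs, t.2.2 = pvBestB prices t.1 t.2.1 := by
  intro t ht
  rw [pvSplitB, List.mem_flatMap] at ht
  obtain ⟨s, hs, ht⟩ := ht
  by_cases hc : s.1 < mi ∧ mi < s.2.1
  · rw [if_pos hc] at ht
    rcases List.mem_append.mp ht with ht | ht
    · split_ifs at ht with h1
      · rcases List.mem_singleton.mp ht with rfl; rfl
      · simp at ht
    · split_ifs at ht with h1
      · rcases List.mem_singleton.mp ht with rfl; rfl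
      · simp at ht
  · rw [if_neg hc] at ht
    rcases List.mem_singleton.mp ht with rfl
    exact h _ hs

theorem pvLoopA_succ (prices : List Int) (n : Int) (f : Nat) (pips : List Int) :
    pvLoopA prices n (f + 1) pips
      = if pips.length < n then
          pvLoopA prices n f
            (PySem.List.sorted (pips ++ [(pvStepA prices pips).2]) (fun x => x) false)
        else pips := rfl

theorem pvLoopB_succ (prices : List Int) (n : Int) (f : Nat) (res : List Int)
    (segs : List (Int × Int × Int × Int)) :
    pvLoopB prices n (f + 1) res segs
      = if res.length < n then
          pvLoopB prices n f (res ++ [(pvScanB segs).2])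
            (if (pvScanB segs).1 > 0 then pvSplitB prices (pvScanB segs).2 segs else segs)
        else res := rfl

theorem pvMain (prices : List Int) (n : Int) :
    ∀ (f : Nat) (pips res : List Int) (segs : List (Int × Int × Int × Int)),
      pvInv prices pips res segs →
      pvLoopA prices n f pips
        = PySem.List.sorted (pvLoopB prices n f res segs) (fun x => x) false := by
  intro f
  induction f with
  | zero => intro pips res segs hinv; exact hinv.1
  | succ f ih =>
    intro pips res segs hinv
    obtain ⟨h1, h2, h3, h4⟩ := hinv
    have hperm : pips.Perm res := by rw [h1]; exact PySem.List.sorted_perm res _ _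
    have hpw : pips.Pairwise (· ≤ ·) := by
      rw [h1]; simpa using PySem.List.sorted_pairwise res (fun x => x)
    have hlen : pips.length = res.length := hperm.length_eq
    rw [pvLoopA_succ, pvLoopB_succ, hlen]
    by_cases hcond : res.length < n
    swap
    · rw [if_neg hcond, if_neg hcond]; exact h1
    rw [if_pos hcond, if_pos hcond]
    have hstep : pvStepA prices pips = pvScanB segs :=
      pvStep_eq prices (pvPairs pips) segs (0, 0) (le_refl 0) h2 h3
    rcases pvScanB_cases segs (0, 0) (le_refl 0) with hz | ⟨s, hs, heq, hpos⟩
    · -- no segment fired: both append the sentinel 0, segments unchanged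
      have hz2 : pvScanB segs = (0, 0) := hz
      have hA2 : (pvStepA prices pips).2 = 0 := by rw [hstep, hz2]
      rw [hA2, hz2]
      rw [if_neg (by norm_num : ¬ ((0, 0) : Int × Int).1 > 0)]
      obtain ⟨u, v0, hud⟩ := List.append_of_mem h4
      have hsorted0 : PySem.List.sorted (pips ++ [0]) (fun x => x) false
          = u ++ 0 :: 0 :: v0 := by
        apply PySem.List.sorted_id_eq_of_perm_of_pairwise
        · rw [hud]
          have := pvPerm_ins (u ++ [0]) v0 0
          simpa [List.append_assoc] using this
        · exact pvPairwise_dup u v0 0 (hud ▸ hpw)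
      refine ih _ _ _ ⟨?_, ?_, h3, ?_⟩
      · rw [← PySem.List.sorted_eq_sorted_of_perm (pips ++ [0]) (res ++ [0]) (fun x => x)
          Function.injective_id (hperm.append_right [0])]
      · rw [hsorted0]
        have e2 : pvPairs (u ++ 0 :: 0 :: v0)
            = pvPairs (u ++ [0]) ++ (0, 0) :: pvPairs (0 :: v0) := by
          rw [pvPairs_append_cons u 0 (0 :: v0), pvPairs_cons_cons]
        have e1 : pvPairs pips = pvPairs (u ++ [0]) ++ pvPairs (0 :: v0) := by
          rw [hud, pvPairs_append_cons u 0 v0]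
        rw [e2, List.filter_append, List.filter_cons]
        simp only [show (decide ((0 : Int) + 1 < 0)) = false by decide, Bool.false_eq_true,
          if_false]
        rw [h2, e1, List.filter_append]
      · rw [hsorted0]
        exact List.mem_append_right u List.mem_cons_self
    · -- a cached best fired: split exactly that segment on both sides
      have heq2 : pvScanB segs = (s.2.2.2, s.2.2.1) := heq
      have hbd := h3 s hs
      have hb2 : 0 < (pvBestB prices s.1 s.2.1).2 := by rw [← hbd]; exact hpos
      obtain ⟨hmi1, hmi2⟩ := pvBestB_pos_bounds prices s.1 s.2.1 hb2
      rw [← hbd] at hmi1 hmi2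
      have hpairmem : (s.1, s.2.1) ∈ (pvPairs pips).filter (fun p => decide (p.1 + 1 < p.2)) := by
        rw [← h2]; exact List.mem_map_of_mem hs
      obtain ⟨hpmem, hcnd⟩ := List.mem_filter.mp hpairmem
      have hcnd' : s.1 + 1 < s.2.1 := of_decide_eq_true hcnd
      obtain ⟨u, v, hud⟩ := pvMem_pairs_split pips (s.1, s.2.1) hpmem
      obtain ⟨hu, hv⟩ := pvBounds u v s.1 s.2.1 (hud ▸ hpw)
      have hA2 : (pvStepA prices pips).2 = s.2.2.1 := by rw [hstep, heq2]
      have hsorted : PySem.List.sorted (pips ++ [s.2.2.1]) (fun x => x) false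
          = u ++ s.1 :: s.2.2.1 :: s.2.1 :: v := by
        apply PySem.List.sorted_id_eq_of_perm_of_pairwise
        · rw [hud]
          have := pvPerm_ins (u ++ [s.1]) (s.2.1 :: v) s.2.2.1
          simpa [List.append_assoc] using this
        · exact pvPairwise_insert u v s.1 s.2.2.1 s.2.1 (hud ▸ hpw) (by omega) (by omega)
      rw [hA2, heq2]
      rw [if_pos (by simpa using hpos : ((s.2.2.2, s.2.2.1) : Int × Int).1 > 0)]
      rw [hsorted]
      -- decompose segs around the fired segment
      have e1 : pvPairs pips
          = pvPairs (u ++ [s.1]) ++ (s.1, s.2.1) :: pvPairs (s.2.1 :: v) := by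
        rw [hud, pvPairs_append_cons u s.1 (s.2.1 :: v), pvPairs_cons_cons]
      have h2' : segs.map pvPrj
          = (pvPairs (u ++ [s.1])).filter (fun p => decide (p.1 + 1 < p.2))
            ++ (s.1, s.2.1) :: (pvPairs (s.2.1 :: v)).filter (fun p => decide (p.1 + 1 < p.2)) := by
        rw [h2, e1, List.filter_append]
        simp [hcnd']
      obtain ⟨S1, rest, hsegs, hS1, hrest⟩ := List.map_eq_append_iff.mp h2'
      obtain ⟨s0, S2, hrest2, hs0prj, hS2⟩ := List.map_eq_cons_iff.mp hrest
      obtain ⟨hs01, hs02⟩ : s0.1 = s.1 ∧ s0.2.1 = s.2.1 := by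
        simpa [pvPrj, Prod.ext_iff] using hs0prj
      have hsplit : pvSplitB prices s.2.2.1 segs
          = S1 ++ ((if s.2.2.1 - s.1 > 1 then [(s.1, s.2.2.1, pvBestB prices s.1 s.2.2.1)] else [])
              ++ (if s.2.1 - s.2.2.1 > 1 then [(s.2.2.1, s.2.1, pvBestB prices s.2.2.1 s.2.1)] else []))
            ++ S2 := by
        rw [pvSplitB, hsegs, hrest2, List.flatMap_append, List.flatMap_cons]
        have hid1 : ∀ x ∈ S1,
            (if x.1 < s.2.2.1 ∧ s.2.2.1 < x.2.1 then
              (if s.2.2.1 - x.1 > 1 then [(x.1, s.2.2.1, pvBestB prices x.1 s.2.2.1)] else [])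
                ++ (if x.2.1 - s.2.2.1 > 1 then [(s.2.2.1, x.2.1, pvBestB prices s.2.2.1 x.2.1)] else [])
            else [x]) = [x] := by
          intro x hx
          have hmem : pvPrj x ∈ (pvPairs (u ++ [s.1])).filter (fun p => decide (p.1 + 1 < p.2)) := by
            rw [← hS1]; exact List.mem_map_of_mem hx
          have hmem2 := (List.mem_filter.mp hmem).1
          have hx2 : x.2.1 ∈ u ++ [s.1] := (pvPairs_mem_comp _ _ hmem2).2
          have hle : x.2.1 ≤ s.1 := by
            rcases List.mem_append.mp hx2 with hxu | hxs
            · exact hu _ hxu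
            · rw [List.mem_singleton.mp hxs]
          rw [if_neg (by omega)]
        have hid2 : ∀ x ∈ S2,
            (if x.1 < s.2.2.1 ∧ s.2.2.1 < x.2.1 then
              (if s.2.2.1 - x.1 > 1 then [(x.1, s.2.2.1, pvBestB prices x.1 s.2.2.1)] else [])
                ++ (if x.2.1 - s.2.2.1 > 1 then [(s.2.2.1, x.2.1, pvBestB prices s.2.2.1 x.2.1)] else [])
            else [x]) = [x] := by
          intro x hx
          have hmem : pvPrj x ∈ (pvPairs (s.2.1 :: v)).filter (fun p => decide (p.1 + 1 < p.2)) := by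
            rw [← hS2]; exact List.mem_map_of_mem hx
          have hmem2 := (List.mem_filter.mp hmem).1
          have hx1 : x.1 ∈ s.2.1 :: v := (pvPairs_mem_comp _ _ hmem2).1
          have hge : s.2.1 ≤ x.1 := by
            rcases List.mem_cons.mp hx1 with hxe | hxv
            · omega
            · exact hv _ hxv
          rw [if_neg (by omega)]
        rw [pvFlatMap_id _ S1 hid1, pvFlatMap_id _ S2 hid2]
        rw [if_pos (by omega : s0.1 < s.2.2.1 ∧ s.2.2.1 < s0.2.1), hs01, hs02]
        simp [List.append_assoc]
      refine ih _ _ _ ⟨?_, ?_, ?_, ?_⟩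
      · rw [← hsorted,
          ← PySem.List.sorted_eq_sorted_of_perm (pips ++ [s.2.2.1]) (res ++ [s.2.2.1]) (fun x => x)
            Function.injective_id (hperm.append_right [s.2.2.1])]
      · rw [hsplit]
        have e2 : pvPairs (u ++ s.1 :: s.2.2.1 :: s.2.1 :: v)
            = pvPairs (u ++ [s.1]) ++ (s.1, s.2.2.1) :: (s.2.2.1, s.2.1) :: pvPairs (s.2.1 :: v) := by
          rw [pvPairs_append_cons u s.1 (s.2.2.1 :: s.2.1 :: v), pvPairs_cons_cons,
            pvPairs_cons_cons]
        rw [e2, List.filter_append, List.filter_cons, List.filter_cons,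
          List.map_append, List.map_append, hS1, List.map_append, hS2]
        by_cases c1 : s.1 + 1 < s.2.2.1 <;> by_cases c2 : s.2.2.1 + 1 < s.2.1 <;>
          simp [c1, c2, show s.2.2.1 - s.1 > 1 ↔ s.1 + 1 < s.2.2.1 from by omega,
            show s.2.1 - s.2.2.1 > 1 ↔ s.2.2.1 + 1 < s.2.1 from by omega, pvPrj]
      · exact pvSplitB_cache prices s.2.2.1 segs h3
      · have : (0 : Int) ∈ pips ++ [s.2.2.1] := List.mem_append_left _ h4
        rw [← hsorted]
        exact (PySem.List.mem_sorted _ _ _ _).mpr this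

-- ===== VERDICT (by name: the statement is the Claim_ definition above) =====
theorem perceptuallyImportantPoints_spec : Claim_equal_perceptuallyImportantPoints := by
  unfold Claim_equal_perceptuallyImportantPoints Spec_perceptuallyImportantPoints
  intro prices n _
  unfold perceptuallyImportantPoints perceptuallyImportantPoints_alt
  by_cases hn : n ≤ 2
  · rw [if_pos hn, show (n - 2).toNat = 0 from by omega]
    rfl
  · rw [if_neg hn]
    cases prices with
    | nil =>
      rw [show (n - 2).toNat = (n - 3).toNat + 1 from by omega]
      rw [pvLoopA_succ, pvLoopB_succ]
      norm_num
      rw [if_pos (by omega : (2 : Int) < n), if_pos (by omega : (2 : Int) < n)]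
      rw [show pvStepA [] [0, -1] = (0, 0) from by decide]
      rw [show pvScanB [] = (0, 0) from by decide]
      norm_num
      rw [show PySem.List.sorted [0, -1, 0] (fun x => x) false = [-1, 0, 0] from by decide]
      exact pvMain [] n _ [-1, 0, 0] [0, -1, 0] [] ⟨by decide, by decide, by simp, by decide⟩
    | cons p ps =>
      apply pvMain
      have hN : 1 ≤ ((p :: ps).length : Int) := by simp
      refine ⟨?_, ?_, ?_, ?_⟩
      · symm
        apply PySem.List.sorted_eq_self_of_pairwise
        simp
      · by_cases hbig : (1 : Int) < ((p :: ps).length : Int) - 1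
        · rw [if_pos (by omega)]
          have : pvPairs [0, ((p :: ps).length : Int) - 1] = [(0, ((p :: ps).length : Int) - 1)] := rfl
          rw [this, List.filter_cons]
          simp only [List.length_cons] at hbig
          simp [pvPrj]
          omega
        · rw [if_neg (by omega)]
          have : pvPairs [0, ((p :: ps).length : Int) - 1] = [(0, ((p :: ps).length : Int) - 1)] := rfl
          rw [this, List.filter_cons]
          simp only [List.length_cons] at hbig
          simp
          omega
      · intro s hs
        split_ifs at hs with h
        · rcases List.mem_singleton.mp hs with rfl; rfl
        · simp at hs
      · exact List.mem_cons_self
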